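-- pv_equiv track=rewrite | github.com/jjob-spec/ingestkit | packages/ingestkit-excel/src/ingestkit_excel/processors/splitter.py | _detect_blank_col_boundaries
-- ===== SOURCE A (Python) =====
-- _BLANK_COL_THRESHOLD = 2
--
-- def _detect_blank_col_boundaries(
--     all_rows: list[list], col_count: int
-- ) -> list[int]:
--     """Find columns where >= _BLANK_COL_THRESHOLD consecutive columns are all blank.
--
--     Returns column indices where blank gaps start.
--     """
--     if col_count == 0 or not all_rows:
--         return []
--
--     boundaries: list[int] = []
--     consecutive_blank = 0
--     gap_start = -1
--
--     for col_idx in range(col_count):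
--         is_blank = all(
--             (col_idx >= len(row) or row[col_idx] is None or str(row[col_idx]).strip() == "")
--             for row in all_rows
--         )
--         if is_blank:
--             if consecutive_blank == 0:
--                 gap_start = col_idx
--             consecutive_blank += 1
--         else:
--             if consecutive_blank >= _BLANK_COL_THRESHOLD:
--                 boundaries.append(gap_start)
--             consecutive_blank = 0
--
--     if consecutive_blank >= _BLANK_COL_THRESHOLD:
--         boundaries.append(gap_start)
--
--     return boundaries
-- ===== SOURCE B (Python) =====
-- _BLANK_COL_THRESHOLD = 2
--
-- def _detect_blank_col_boundaries(all_rows, col_count):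
--     """Table-then-scan: build the per-column blank table once, then pick out
--     run starts by comparing each column with its neighbours."""
--     if col_count == 0 or not all_rows:
--         return []
--     blank = [
--         all(c >= len(row) or row[c] is None or str(row[c]).strip() == "" for row in all_rows)
--         for c in range(col_count)
--     ]
--     prev = [False] + blank[:-1]
--     nxt = blank[1:] + [False]
--     return [c for c, (p, b, x) in enumerate(zip(prev, blank, nxt)) if b and x and not p]
-- ===== Notes on version B (the rewrite author's own statement) =====
-- stated objective: alternative
-- what changed: A's single fused loop with consecutive-blank counter and gap_start state is replaced by a two-phase decomposition: first build the per-column blank table, then select run starts by a stateless neighbour comparison (blank[c] and blank[c+1] and not blank[c-1]) via zip/enumerate.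
import Mathlib
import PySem

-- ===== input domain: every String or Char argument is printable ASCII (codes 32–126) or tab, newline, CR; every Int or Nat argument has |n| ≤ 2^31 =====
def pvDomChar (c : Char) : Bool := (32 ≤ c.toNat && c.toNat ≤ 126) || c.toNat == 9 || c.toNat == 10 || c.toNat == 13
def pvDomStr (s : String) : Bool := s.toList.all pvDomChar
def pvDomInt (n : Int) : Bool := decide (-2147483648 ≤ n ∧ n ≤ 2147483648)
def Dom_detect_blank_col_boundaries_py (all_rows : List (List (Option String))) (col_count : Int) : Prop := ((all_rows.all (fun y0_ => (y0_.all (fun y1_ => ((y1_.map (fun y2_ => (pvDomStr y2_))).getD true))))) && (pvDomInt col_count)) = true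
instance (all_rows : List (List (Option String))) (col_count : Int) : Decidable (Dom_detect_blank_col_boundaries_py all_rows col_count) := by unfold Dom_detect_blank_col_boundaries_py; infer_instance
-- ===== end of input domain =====

-- B replaces A's fused loop with counter state by a blank-column table plus a
-- neighbour-comparison scan (objective: alternative decomposition, same cost).

-- ===== PORT A =====
-- shared by both ports: the per-column blankness test both Pythons spell identically
def pvBlankCol (all_rows : List (List (Option String))) (c : Int) : Bool :=
  all_rows.all (fun row =>
    decide ((row.length : Int) ≤ c) ||
    (match PySem.List.pyGet? row c with
     | none => false           -- unreachable: guarded by the length test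
     | some none => true       -- row[c] is None
     | some (some s) => PySem.Str.strip s == ""))

def detect_blank_col_boundaries_py (all_rows : List (List (Option String))) (col_count : Int) : List Int :=
  if col_count = 0 || all_rows.isEmpty then []
  else
    let st :=
      (PySem.List.pyRange 0 col_count 1).foldl
        (fun (st : List Int × Int × Int) col_idx =>
          if pvBlankCol all_rows col_idx then
            (st.1, st.2.1 + 1, if st.2.1 = 0 then col_idx else st.2.2)
          else
            ((if st.2.1 ≥ 2 then st.1 ++ [st.2.2] else st.1), 0, st.2.2))
        ([], 0, -1)
    if st.2.1 ≥ 2 then st.1 ++ [st.2.2] else st.1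

-- ===== PORT B =====
def detect_blank_col_boundaries_py_alt (all_rows : List (List (Option String))) (col_count : Int) : List Int :=
  if col_count = 0 || all_rows.isEmpty then []
  else
    let blank := (PySem.List.pyRange 0 col_count 1).map (fun c => pvBlankCol all_rows c)
    let prev := false :: PySem.List.slice blank none (some (-1))
    let nxt := PySem.List.slice blank (some 1) none ++ [false]
    -- zip / enumerate ported via List.zipWith / List.zipIdx (definitionally List.zip /
    -- PySem.List.enumerate, see lemma pvAlt_pair below) so the port evaluates tail-recursively
    (((List.zipWith (fun p q => (p, q)) prev
        (List.zipWith (fun b x => (b, x)) blank nxt)).zipIdx.map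
          (fun p => ((0 : Int) + (p.2 : Int), p.1))).filterMap
      (fun p => if p.2.2.1 && p.2.2.2 && !p.2.1 then some p.1 else none))

-- ===== PRECONDITION & SPEC =====
def Spec_detect_blank_col_boundaries_py (all_rows : List (List (Option String))) (col_count : Int) (out : List Int) : Prop := out = detect_blank_col_boundaries_py_alt all_rows col_count
instance (all_rows : List (List (Option String))) (col_count : Int) (out : List Int) : Decidable (Spec_detect_blank_col_boundaries_py all_rows col_count out) := by unfold Spec_detect_blank_col_boundaries_py; infer_instance

-- ===== CLAIM (what is proved, stated in full; the proofs are below) =====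
def Claim_equal_detect_blank_col_boundaries_py : Prop := ∀ (all_rows : List (List (Option String))) (col_count : Int), Dom_detect_blank_col_boundaries_py all_rows col_count → Spec_detect_blank_col_boundaries_py all_rows col_count (detect_blank_col_boundaries_py all_rows col_count)

-- ===== LEMMAS AND PROOFS =====

-- reference run-detector: remaining blank flags, current absolute index, current consecutive count
def pvF : List Bool → Int → Int → List Int
  | [], idx, c => if c ≥ 2 then [idx - c] else []
  | true :: t, idx, c => pvF t (idx + 1) (c + 1)
  | false :: t, idx, c => (if c ≥ 2 then [idx - c] else []) ++ pvF t (idx + 1) 0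

-- "inside a long run": skip the rest of the run, then continue fresh
def pvG : List Bool → Int → List Int
  | [], _ => []
  | true :: t, idx => pvG t (idx + 1)
  | false :: t, idx => pvF t (idx + 1) 0

-- neighbour scan (B's shape): carries the previous flag
def pvZ : Bool → List Bool → Int → List Int
  | prev, b :: t, idx =>
      (if b && t.headD false && !prev then [idx] else []) ++ pvZ b t (idx + 1)
  | _, [], _ => []

theorem pvF_run (bl : List Bool) : ∀ (idx c : Int), 2 ≤ c →
    pvF bl idx c = (idx - c) :: pvG bl idx := by
  induction bl with
  | nil => intro idx c hc; simp [pvF, pvG, hc]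
  | cons b t ih =>
    intro idx c hc
    cases b with
    | true =>
      show pvF t (idx + 1) (c + 1) = (idx - c) :: pvG t (idx + 1)
      rw [ih (idx + 1) (c + 1) (by omega)]
      congr 1; omega
    | false =>
      simp [pvF, pvG, show c ≥ 2 from hc]

theorem pvF_eq_pvZ : ∀ (n : Nat) (bl : List Bool), bl.length ≤ n → ∀ idx : Int,
    pvF bl idx 0 = pvZ false bl idx ∧ pvG bl idx = pvZ true bl idx := by
  intro n
  induction n with
  | zero =>
    intro bl h idx
    have : bl = [] := List.eq_nil_of_length_eq_zero (by omega)
    subst this; simp [pvF, pvG, pvZ]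
  | succ n ih =>
    intro bl h idx
    match bl with
    | [] => simp [pvF, pvG, pvZ]
    | b :: t =>
      have ht : t.length ≤ n := by simp at h; omega
      constructor
      · cases b with
        | false =>
          show (if (0:Int) ≥ 2 then [idx - 0] else []) ++ pvF t (idx + 1) 0 = pvZ false (false :: t) idx
          simp only [pvZ, Bool.false_and]
          simpa using (ih t ht (idx + 1)).1
        | true =>
          show pvF t (idx + 1) (0 + 1) = pvZ false (true :: t) idx
          match t with
          | [] => simp [pvF, pvZ]
          | true :: u =>
            have hu : u.length ≤ n := by simp at h; omega
            show pvF u (idx + 1 + 1) (0 + 1 + 1) = pvZ false (true :: true :: u) idx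
            rw [show ((0:Int) + 1 + 1) = 2 by norm_num,
                pvF_run u (idx + 1 + 1) 2 (by omega), (ih u hu (idx + 1 + 1)).2]
            simp [pvZ]
            omega
          | false :: u =>
            have hu : u.length ≤ n := by simp at h; omega
            show (if (0:Int) + 1 ≥ 2 then [idx + 1 - (0 + 1)] else []) ++ pvF u (idx + 1 + 1) 0
                = pvZ false (true :: false :: u) idx
            rw [if_neg (by omega), (ih u hu (idx + 1 + 1)).1]
            simp [pvZ]
      · cases b with
        | false =>
          show pvF t (idx + 1) 0 = pvZ true (false :: t) idx
          simp only [pvZ]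
          simpa using (ih t ht (idx + 1)).1
        | true =>
          show pvG t (idx + 1) = pvZ true (true :: t) idx
          simp only [pvZ, Bool.not_true, Bool.and_false]
          simpa using (ih t ht (idx + 1)).2

-- A's fold over a contiguous range equals pvF on the mapped blank flags
theorem pvA_fold (β : Int → Bool) : ∀ (m : Nat) (idx : Int) (bs : List Int) (c g : Int),
    (c = 0 ∨ g = idx - c) →
    (let st :=
      (PySem.List.pyRange idx (idx + m) 1).foldl
        (fun (st : List Int × Int × Int) col_idx =>
          if β col_idx then
            (st.1, st.2.1 + 1, if st.2.1 = 0 then col_idx else st.2.2)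
          else
            ((if st.2.1 ≥ 2 then st.1 ++ [st.2.2] else st.1), 0, st.2.2))
        (bs, c, g)
     if st.2.1 ≥ 2 then st.1 ++ [st.2.2] else st.1)
    = bs ++ pvF ((PySem.List.pyRange idx (idx + m) 1).map β) idx c := by
  intro m
  induction m with
  | zero =>
    intro idx bs c g hinv
    rw [PySem.List.pyRange_one_eq_nil (by omega)]
    simp only [List.foldl_nil, List.map_nil, pvF]
    rcases hinv with h0 | hg
    · subst h0; simp
    · subst hg; split <;> simp
  | succ m ih =>
    intro idx bs c g hinv
    rw [PySem.List.pyRange_one_cons (by omega)]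
    have hrange : idx + 1 + (m : Int) = idx + ((m : Nat) + 1 : Nat) := by push_cast; ring
    simp only [List.foldl_cons, List.map_cons]
    cases hb : β idx with
    | true =>
      simp only [pvF]
      have hinv' : (c + 1 = 0) ∨ ((if c = 0 then idx else g) = (idx + 1) - (c + 1)) := by
        right
        by_cases hc0 : c = 0
        · rw [if_pos hc0]; omega
        · rw [if_neg hc0]; rcases hinv with h0 | hg'
          · exact absurd h0 hc0
          · omega
      have h1 := ih (idx + 1) bs (c + 1) (if c = 0 then idx else g) hinv'
      rw [hrange] at h1
      exact h1
    | false =>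
      simp only [Bool.false_eq_true, if_false, pvF]
      have h1 := ih (idx + 1) (if c ≥ 2 then bs ++ [g] else bs) 0 g (Or.inl rfl)
      rw [hrange] at h1
      rw [h1]
      by_cases hc : c ≥ 2
      · have hg : g = idx - c := hinv.resolve_left (by omega)
        subst hg; simp [hc]
      · simp [hc]

-- the zipWith/zipIdx spelling in port B is exactly enumerate-of-zip
theorem pvAlt_pair (prev blank nxt : List Bool) :
    (List.zipWith (fun p q => (p, q)) prev
        (List.zipWith (fun b x => (b, x)) blank nxt)).zipIdx.map
          (fun p => ((0 : Int) + (p.2 : Int), p.1))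
    = PySem.List.enumerate (prev.zip (blank.zip nxt)) 0 := by
  rw [PySem.List.enumerate_eq_zipIdx_map]
  rfl

-- B's zip/enumerate comprehension equals the neighbour scan pvZ
theorem pvB_zip : ∀ (bl : List Bool) (prev : Bool) (idx : Int),
    (PySem.List.enumerate ((prev :: bl.dropLast).zip (bl.zip (bl.tail ++ [false]))) idx).filterMap
      (fun p => if p.2.2.1 && p.2.2.2 && !p.2.1 then some p.1 else none)
    = pvZ prev bl idx := by
  intro bl
  induction bl with
  | nil => intro prev idx; simp [pvZ]
  | cons b t ih =>
    intro prev idx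
    match t with
    | [] =>
      simp [PySem.List.enumerate_cons, PySem.List.enumerate_nil, pvZ]
    | x :: u =>
      have hstep :
          (prev :: (b :: x :: u).dropLast).zip ((b :: x :: u).zip ((b :: x :: u).tail ++ [false]))
          = (prev, (b, x)) :: (b :: (x :: u).dropLast).zip ((x :: u).zip ((x :: u).tail ++ [false])) := by
        simp [List.zip]
      rw [hstep, PySem.List.enumerate_cons, List.filterMap_cons]
      rw [ih b (idx + 1)]
      simp only [pvZ, List.headD]
      by_cases hcb : (b && x && !prev) = true
      · rw [if_pos hcb]
        simp only [Bool.and_eq_true, Bool.not_eq_true'] at hcb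
        simp [hcb.1.1, hcb.1.2, hcb.2]
      · rw [if_neg hcb]
        simp only [Bool.and_eq_true, Bool.not_eq_true'] at hcb
        simp
        intro h1 h2
        cases prev
        · exact absurd ⟨⟨h1, h2⟩, rfl⟩ hcb
        · rfl

theorem detect_main (all_rows : List (List (Option String))) (col_count : Int) :
    detect_blank_col_boundaries_py all_rows col_count
    = detect_blank_col_boundaries_py_alt all_rows col_count := by
  unfold detect_blank_col_boundaries_py detect_blank_col_boundaries_py_alt
  by_cases hguard : col_count = 0 || all_rows.isEmpty
  · simp [hguard]
  · simp only [hguard, if_false, Bool.false_eq_true]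
    set β := fun c => pvBlankCol all_rows c with hβ
    set bl := (PySem.List.pyRange 0 col_count 1).map β with hbl
    -- B side
    rw [PySem.List.slice_to_neg_one, PySem.List.slice_from_one, pvAlt_pair, pvB_zip bl false 0]
    -- A side
    rcases (by omega : (0 : Int) + (col_count.toNat : Int) = col_count ∨ col_count < 0) with hm | hneg
    · have h1 := pvA_fold β col_count.toNat 0 [] 0 (-1) (Or.inl rfl)
      rw [hm] at h1
      rw [h1]
      simp only [List.nil_append, ← hbl]
      exact (pvF_eq_pvZ bl.length bl le_rfl 0).1
    · have hnil : PySem.List.pyRange 0 col_count 1 = [] :=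
        PySem.List.pyRange_one_eq_nil (by omega)
      rw [hbl, hnil]
      simp [pvZ]

-- ===== VERDICT (by name: the statement is the Claim_ definition above) =====
theorem detect_blank_col_boundaries_py_spec : Claim_equal_detect_blank_col_boundaries_py := by
  intro all_rows col_count _
  unfold Spec_detect_blank_col_boundaries_py
  exact detect_main all_rows col_count
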